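-- pv_equiv track=rewrite | github.com/samarpro/villani-code | benchmark_tasks/villani_bench_v1/bugfix_004_retry_policy/repo/src/app/client.py | send_with_retry
-- ===== SOURCE A (Python) =====
-- def send_with_retry(statuses: list[int], max_retries: int = 2) -> int:
--     attempts = 0
--     for status in statuses:
--         if status < 500 and attempts < max_retries:
--             attempts += 1
--             continue
--         if status in {500, 502, 503, 504, 429} and attempts < max_retries:
--             attempts += 1
--             continue
--         return attempts + 1
--     return attempts + 1
-- ===== SOURCE B (Python) =====
-- def send_with_retry(statuses: list[int], max_retries: int = 2) -> int:
--     # length of the leading run of retryable statuses, then a closed-form cap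
--     p = 0
--     for s in statuses:
--         if s >= 500 and s not in {500, 502, 503, 504, 429}:
--             break
--         p += 1
--     return min(p, max(max_retries, 0)) + 1
-- ===== Notes on version B (the rewrite author's own statement) =====
-- stated objective: simpler
-- what changed: Replaces the interleaved attempts-bound check and mid-loop early returns with a plain count of the leading retryable-status run followed by the closed-form min(p, max(max_retries, 0)) + 1.
import Mathlib
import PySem

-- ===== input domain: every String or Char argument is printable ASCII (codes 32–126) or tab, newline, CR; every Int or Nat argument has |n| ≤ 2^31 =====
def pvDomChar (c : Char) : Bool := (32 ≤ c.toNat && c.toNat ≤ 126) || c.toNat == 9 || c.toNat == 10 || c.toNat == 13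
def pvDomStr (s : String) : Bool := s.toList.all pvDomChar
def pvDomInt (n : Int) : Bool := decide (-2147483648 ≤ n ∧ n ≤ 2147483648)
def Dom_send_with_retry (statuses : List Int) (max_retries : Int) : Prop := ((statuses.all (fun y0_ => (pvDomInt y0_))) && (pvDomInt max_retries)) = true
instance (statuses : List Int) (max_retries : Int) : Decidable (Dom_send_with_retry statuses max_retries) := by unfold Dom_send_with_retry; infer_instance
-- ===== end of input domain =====

-- B counts the leading retryable run and applies min(p, max(max_retries,0)) + 1 in closed form, replacing the interleaved bound check (objective: simpler).
-- ===== PORT A =====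
-- A's loop: attempts accumulator, two retry branches, early return otherwise
def sendLoopA (statuses : List Int) (max_retries : Int) (attempts : Int) : Int :=
  match statuses with
  | [] => attempts + 1
  | status :: rest =>
    if status < 500 ∧ attempts < max_retries then
      sendLoopA rest max_retries (attempts + 1)
    else if status ∈ ([500, 502, 503, 504, 429] : List Int) ∧ attempts < max_retries then
      sendLoopA rest max_retries (attempts + 1)
    else
      attempts + 1

def send_with_retry (statuses : List Int) (max_retries : Int) : Int :=
  sendLoopA statuses max_retries 0

-- ===== PORT B =====
-- B: count the leading retryable run (break on first non-retryable), then cap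
def prefLenB (statuses : List Int) : Int :=
  match statuses with
  | [] => 0
  | s :: rest =>
    if s ≥ 500 ∧ s ∉ ([500, 502, 503, 504, 429] : List Int) then 0
    else 1 + prefLenB rest

def send_with_retry_alt (statuses : List Int) (max_retries : Int) : Int :=
  min (prefLenB statuses) (max max_retries 0) + 1

-- ===== PRECONDITION & SPEC =====
def Spec_send_with_retry (statuses : List Int) (max_retries : Int) (out : Int) : Prop := out = send_with_retry_alt statuses max_retries
instance (statuses : List Int) (max_retries : Int) (out : Int) : Decidable (Spec_send_with_retry statuses max_retries out) := by unfold Spec_send_with_retry; infer_instance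

-- ===== CLAIM (what is proved, stated in full; the proofs are below) =====
def Claim_equal_send_with_retry : Prop := ∀ (statuses : List Int) (max_retries : Int), Dom_send_with_retry statuses max_retries → Spec_send_with_retry statuses max_retries (send_with_retry statuses max_retries)

-- ===== LEMMAS AND PROOFS =====

-- ===== VERDICT (by name: the statement is the Claim_ definition above) =====
lemma prefLenB_nonneg (xs : List Int) : 0 ≤ prefLenB xs := by
  induction xs with
  | nil => simp [prefLenB]
  | cons h t ih => simp only [prefLenB]; split <;> omega

lemma sendLoopA_eq (xs : List Int) (mr a : Int) (ha : a ≤ mr) :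
    sendLoopA xs mr a = min (a + prefLenB xs) mr + 1 := by
  induction xs generalizing a with
  | nil => simp [sendLoopA, prefLenB]; omega
  | cons h t ih =>
    have hp := prefLenB_nonneg t
    by_cases hlt : a < mr
    · by_cases hr : h ≥ 500 ∧ h ∉ ([500, 502, 503, 504, 429] : List Int)
      · -- non-retryable head: A returns, B's prefix length is 0
        have h1 : ¬ (h < 500 ∧ a < mr) := by omega
        have h2 : ¬ (h ∈ ([500, 502, 503, 504, 429] : List Int) ∧ a < mr) := by
          intro hc; exact hr.2 hc.1
        simp only [sendLoopA, prefLenB, if_pos hr, if_neg h1, if_neg h2]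
        omega
      · -- retryable head: both recurse / count one
        have hstep : sendLoopA (h :: t) mr a = sendLoopA t mr (a + 1) := by
          simp only [sendLoopA]
          by_cases h5 : h < 500
          · rw [if_pos ⟨h5, hlt⟩]
          · have hmem : h ∈ ([500, 502, 503, 504, 429] : List Int) := by
              by_contra hnm; exact hr ⟨by omega, hnm⟩
            rw [if_neg (by intro hc; exact h5 hc.1), if_pos ⟨hmem, hlt⟩]
        have hpre : prefLenB (h :: t) = 1 + prefLenB t := by
          simp only [prefLenB, if_neg hr]
        rw [hstep, ih (a + 1) (by omega), hpre]
        omega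
    · -- attempts bound reached: A returns a + 1 on any head
      have hae : a = mr := le_antisymm ha (by omega)
      have h1 : ¬ (h < 500 ∧ a < mr) := by omega
      have h2 : ¬ (h ∈ ([500, 502, 503, 504, 429] : List Int) ∧ a < mr) := by omega
      simp only [sendLoopA, if_neg h1, if_neg h2]
      have := prefLenB_nonneg (h :: t)
      omega

-- ===== VERDICT (by name: the statement is the Claim_ definition above) =====
theorem send_with_retry_spec : Claim_equal_send_with_retry := by
  intro statuses max_retries _
  unfold Spec_send_with_retry send_with_retry send_with_retry_alt
  have hp := prefLenB_nonneg statuses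
  by_cases hmr : 0 ≤ max_retries
  · rw [sendLoopA_eq statuses max_retries 0 hmr]; omega
  · -- max_retries < 0: the loop returns 1 immediately; the cap is 0
    cases statuses with
    | nil => simp [sendLoopA, prefLenB]
    | cons h t =>
      have h1 : ¬ (h < 500 ∧ (0:Int) < max_retries) := by omega
      have h2 : ¬ (h ∈ ([500, 502, 503, 504, 429] : List Int) ∧ (0:Int) < max_retries) := by omega
      simp only [sendLoopA, if_neg h1, if_neg h2]
      have := prefLenB_nonneg (h :: t)
      omega
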